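-- pv_equiv track=rewrite | github.com/YElnadi/DSA-TwoPointers | practice questions /practice.py | solution
-- ===== SOURCE A (Python) =====
-- def solution(s,t):
--     count = 0
--     for char in range(len(s)):
--         if s[char].isdigit():
--             new_string= s[0:char] + s[char+1:]
--             if new_string < t:
--                 count += 1
--
--     for char in range(len(t)):
--         if t[char].isdigit():
--             new_t= t[0:char] + t[char+1:]
--             if s < new_t:
--                 count +=1
--
--     return count
-- ===== SOURCE B (Python) =====
-- def _count(u, v, want):
--     # counts digit positions i of u with cmp(u with i deleted, v) == want,
--     # using a precomputed common-prefix length and a backward pass of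
--     # suffix comparisons instead of building and comparing sliced copies.
--     n, m = len(u), len(v)
--     k = 0
--     while k < n and k < m and u[k] == v[k]:
--         k += 1
--     # comparison verdict for deletions strictly after the mismatch (only reached when k < n)
--     if k == m:
--         after = 1
--     elif k < n and u[k] < v[k]:
--         after = -1
--     else:
--         after = 1
--     cnext = 0
--     res = 0
--     for i in range(n - 1, -1, -1):
--         if i >= m:
--             ci = 0 if i + 1 == n else 1
--         elif i + 1 == n:
--             ci = -1
--         elif u[i + 1] < v[i]:
--             ci = -1
--         elif u[i + 1] > v[i]:
--             ci = 1
--         else: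
--             ci = cnext
--         cnext = ci
--         if u[i].isdigit():
--             if (ci if i <= k else after) == want:
--                 res += 1
--     return res
--
-- def solution(s, t):
--     return _count(s, t, -1) + _count(t, s, 1)
-- ===== Notes on version B (the rewrite author's own statement) =====
-- stated objective: alternative
-- what changed: Instead of rebuilding and lexicographically comparing a fresh sliced string for every digit position, B precomputes the common-prefix mismatch index of the two strings and one backward pass of three-way suffix comparisons, and reads each deletion's verdict off that table.
import Mathlib
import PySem

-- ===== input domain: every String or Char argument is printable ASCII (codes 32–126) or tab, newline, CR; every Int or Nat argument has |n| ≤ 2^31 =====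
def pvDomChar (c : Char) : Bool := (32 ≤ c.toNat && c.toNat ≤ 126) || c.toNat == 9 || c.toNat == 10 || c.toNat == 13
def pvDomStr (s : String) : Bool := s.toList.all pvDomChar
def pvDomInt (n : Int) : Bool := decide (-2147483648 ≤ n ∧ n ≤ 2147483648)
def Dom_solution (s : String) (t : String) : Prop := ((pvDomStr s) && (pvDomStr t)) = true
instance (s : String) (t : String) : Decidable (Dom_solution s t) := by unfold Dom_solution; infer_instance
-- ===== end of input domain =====

-- B replaces A's per-deletion slice-and-compare by a precomputed common-prefix mismatch
-- index plus one backward pass of three-way suffix comparisons (a different algorithm;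
-- not measured faster: A's slicing runs at C speed in CPython).

-- ===== PORT A =====
-- literal transliteration of Source A: two index loops, each building the deleted string
-- by slicing and comparing it whole against the other string.
def solution (s : String) (t : String) : Int :=
  let sl := s.toList
  let tl := t.toList
  let count : Int :=
    (PySem.List.pyRange 0 (PySem.List.len sl) 1).foldl (fun count ch =>
      if PySem.Str.isdigit (PySem.List.pyGetD sl ch ' ') then
        if (PySem.List.slice sl (some 0) (some ch) ++
            PySem.List.slice sl (some (ch + 1)) none) < tl then count + 1 else count
      else count) 0
  (PySem.List.pyRange 0 (PySem.List.len tl) 1).foldl (fun count ch =>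
    if PySem.Str.isdigit (PySem.List.pyGetD tl ch ' ') then
      if sl < (PySem.List.slice tl (some 0) (some ch) ++
               PySem.List.slice tl (some (ch + 1)) none) then count + 1 else count
    else count) count

-- ===== PORT B =====
-- transliteration of Source B (helper _count and solution).

-- Source B's `while k < n and k < m and u[k] == v[k]: k += 1` scan
def lcpLenB : List Char → List Char → Nat
  | a :: as, b :: bs => if a = b then lcpLenB as bs + 1 else 0
  | _, _ => 0

-- Source B's `after` value (verdict for deletions strictly after the first mismatch)
def afterB (u v : List Char) : Int :=
  let k := lcpLenB u v
  if k = v.length then 1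
  else if k < u.length ∧ PySem.List.pyGetD u (k : Int) ' ' < PySem.List.pyGetD v (k : Int) ' '
  then -1
  else 1

-- body of Source B's backward `for i in range(n - 1, -1, -1)` loop; state = (cnext, res)
def stepB (u v : List Char) (want : Int) (st : Int × Int) (i : Int) : Int × Int :=
  let n := u.length
  let m := v.length
  let k := lcpLenB u v
  let ci : Int :=
    if (m : Int) ≤ i then (if i + 1 = (n : Int) then 0 else 1)
    else if i + 1 = (n : Int) then -1
    else if PySem.List.pyGetD u (i + 1) ' ' < PySem.List.pyGetD v i ' ' then -1
    else if PySem.List.pyGetD v i ' ' < PySem.List.pyGetD u (i + 1) ' ' then 1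
    else st.1
  let res : Int :=
    if PySem.Str.isdigit (PySem.List.pyGetD u i ' ') ∧
       (if i ≤ (k : Int) then ci else afterB u v) = want
    then st.2 + 1 else st.2
  (ci, res)

-- Source B's _count(u, v, want)
def countB (u v : List Char) (want : Int) : Int :=
  ((PySem.List.pyRange ((u.length : Int) - 1) (-1) (-1)).foldl (stepB u v want) (0, 0)).2

def solution_alt (s : String) (t : String) : Int :=
  countB s.toList t.toList (-1) + countB t.toList s.toList 1

-- ===== PRECONDITION & SPEC =====
def Spec_solution (s : String) (t : String) (out : Int) : Prop := out = solution_alt s t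
instance (s : String) (t : String) (out : Int) : Decidable (Spec_solution s t out) := by unfold Spec_solution; infer_instance

-- ===== CLAIM (what is proved, stated in full; the proofs are below) =====
def Claim_equal_solution : Prop := ∀ (s : String) (t : String), Dom_solution s t → Spec_solution s t (solution s t)

-- ===== LEMMAS AND PROOFS =====

-- three-way lexicographic comparison (proof-side characterisation of Python's str <)
def cmp3 : List Char → List Char → Int
  | [], [] => 0
  | [], _ :: _ => -1
  | _ :: _, [] => 1
  | a :: as, b :: bs => if a < b then -1 else if b < a then 1 else cmp3 as bs

-- the string with index i deleted, as A builds it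
def delAt (u : List Char) (i : Nat) : List Char := u.take i ++ u.drop (i + 1)

-- B's O(1) verdict for deleting index j of u, compared against v
def verdictB (u v : List Char) (j : Nat) : Int :=
  if j ≤ lcpLenB u v then cmp3 (u.drop (j + 1)) (v.drop j) else afterB u v

def predB (u v : List Char) (want : Int) (j : Nat) : Bool :=
  PySem.Str.isdigit (u.getD j ' ') && decide (verdictB u v j = want)

-- count of positions j ≤ · < u.length satisfying predB
def Rfun (u v : List Char) (want : Int) (j : Nat) : Int :=
  if _h : j < u.length then (if predB u v want j then 1 else 0) + Rfun u v want (j + 1)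
  else 0
termination_by u.length - j

-- cnext after the backward loop has processed indices down to i
def cstate (u v : List Char) (i : Nat) : Int :=
  if i = u.length then 0 else cmp3 (u.drop (i + 1)) (v.drop i)

theorem cmp3_neg_one_iff (a b : List Char) : cmp3 a b = -1 ↔ a < b := by
  induction a generalizing b with
  | nil => cases b <;> simp [cmp3]
  | cons x xs ih => cases b with
    | nil => simp [cmp3]
    | cons y ys =>
      rw [List.cons_lt_cons_iff]
      simp only [cmp3]
      by_cases hxy : x < y
      · simp [hxy]
      · by_cases hyx : y < x
        · have hne : x ≠ y := fun h => absurd (h ▸ hyx) (lt_irrefl _)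
          simp [hxy, hyx, hne]
        · have hxy' : x = y := le_antisymm (not_lt.1 hyx) (not_lt.1 hxy)
          simp [ih, hxy']

theorem cmp3_swap (a b : List Char) : cmp3 a b = - cmp3 b a := by
  induction a generalizing b with
  | nil => cases b <;> simp [cmp3]
  | cons x xs ih => cases b with
    | nil => simp [cmp3]
    | cons y ys =>
      simp only [cmp3]
      by_cases hxy : x < y
      · have : ¬ y < x := fun h => absurd (hxy.trans h) (lt_irrefl _)
        simp [hxy, this]
      · by_cases hyx : y < x
        · simp [hxy, hyx]
        · simp [hxy, hyx, ih]

theorem cmp3_one_iff (a b : List Char) : cmp3 a b = 1 ↔ b < a := by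
  rw [cmp3_swap, ← cmp3_neg_one_iff b a]; omega

theorem cmp3_append_left (p a b : List Char) : cmp3 (p ++ a) (p ++ b) = cmp3 a b := by
  induction p with
  | nil => simp
  | cons x xs ih => simpa [cmp3] using ih
theorem lcp_le_right (u v : List Char) : lcpLenB u v ≤ v.length := by
  induction u generalizing v with
  | nil => simp [lcpLenB]
  | cons x xs ih => cases v with
    | nil => simp [lcpLenB]
    | cons y ys =>
      simp only [lcpLenB, List.length_cons]
      split <;> simp_all

theorem lcp_take (u v : List Char) : u.take (lcpLenB u v) = v.take (lcpLenB u v) := by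
  induction u generalizing v with
  | nil => simp [lcpLenB]
  | cons x xs ih => cases v with
    | nil => simp [lcpLenB]
    | cons y ys =>
      simp only [lcpLenB]
      split
      · next h => simp [List.take_succ_cons, h, ih ys]
      · simp

theorem lcp_mismatch (u v : List Char) (h1 : lcpLenB u v < u.length) (h2 : lcpLenB u v < v.length) :
    u.getD (lcpLenB u v) ' ' ≠ v.getD (lcpLenB u v) ' ' := by
  induction u generalizing v with
  | nil => simp at h1
  | cons x xs ih => cases v with
    | nil => simp at h2
    | cons y ys =>
      simp only [lcpLenB] at *
      by_cases h : x = y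
      · rw [if_pos h] at h1 h2 ⊢
        simp only [List.length_cons] at h1 h2
        simpa using ih ys (by omega) (by omega)
      · rw [if_neg h]
        simpa using h
theorem take_eq_of_le_lcp (u v : List Char) (i : Nat) (hi : i ≤ lcpLenB u v) :
    u.take i = v.take i := by
  have h := lcp_take u v
  calc u.take i = (u.take (lcpLenB u v)).take i := by rw [List.take_take, Nat.min_eq_left hi]
    _ = (v.take (lcpLenB u v)).take i := by rw [h]
    _ = v.take i := by rw [List.take_take, Nat.min_eq_left hi]

theorem cmp_delAt (u v : List Char) (j : Nat) (hj : j < u.length) :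
    cmp3 (delAt u j) v = verdictB u v j := by
  set k := lcpLenB u v with hk
  by_cases hjk : j ≤ k
  · -- common-prefix case: first j characters agree
    have hpre : u.take j = v.take j := take_eq_of_le_lcp u v j hjk
    rw [verdictB, if_pos hjk, delAt, hpre]
    have h := cmp3_append_left (v.take j) (u.drop (j + 1)) (v.drop j)
    rw [List.take_append_drop] at h
    exact h
  · -- deletion strictly after the first mismatch
    rw [not_le] at hjk
    have hku : k < u.length := lt_of_le_of_lt (Nat.le_of_lt hjk) hj
    have hkv : k ≤ v.length := lcp_le_right u v
    rw [verdictB, if_neg (by omega)]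
    have htk : (u.take j).take k = u.take k := by
      rw [List.take_take, Nat.min_eq_left (by omega)]
    have hsplit : delAt u j = u.take k ++ ((u.take j).drop k ++ u.drop (j + 1)) := by
      rw [delAt, ← List.append_assoc, ← htk, List.take_append_drop]
    have hlen : ((u.take j).drop k).length = j - k := by
      simp [Nat.min_eq_left (le_of_lt hj)]
    by_cases hkm : k = v.length
    · -- v is exactly the common prefix: the deleted string is strictly longer
      have hv : v = u.take k := by
        rw [show u.take k = v.take k from lcp_take u v, hkm, List.take_length]
      obtain ⟨c, cs, hcs⟩ : ∃ c cs, (u.take j).drop k = c :: cs := by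
        cases hcc : (u.take j).drop k with
        | nil => exfalso; rw [hcc] at hlen; simp at hlen; omega
        | cons c cs => exact ⟨c, cs, rfl⟩
      rw [afterB]
      simp only [← hk, if_pos hkm]
      rw [hsplit, hcs]
      have h := cmp3_append_left (u.take k) (c :: (cs ++ u.drop (j + 1))) []
      simp only [List.append_nil, List.cons_append] at h ⊢
      rw [hv, h]
      rfl
    · -- mismatch at k inside both strings
      have hkv' : k < v.length := lt_of_le_of_ne hkv hkm
      have hne : u.getD k ' ' ≠ v.getD k ' ' := lcp_mismatch u v hku hkv'
      rw [List.getD_eq_getElem u ' ' hku, List.getD_eq_getElem v ' ' hkv'] at hne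
      have hdrop : (u.take j).drop k = u[k]'hku :: (u.take j).drop (k + 1) := by
        rw [List.drop_eq_getElem_cons (by simp [Nat.min_eq_left (le_of_lt hj)]; omega)]
        congr 1
        simp [List.getElem_take]
      have hvdec : v = u.take k ++ (v[k]'hkv' :: v.drop (k + 1)) := by
        conv_lhs => rw [← List.take_append_drop k v]
        rw [← lcp_take u v, ← hk]
        congr 1
        exact List.drop_eq_getElem_cons hkv'
      rw [hsplit, hdrop]
      conv_lhs => rw [hvdec]
      simp only [List.cons_append]
      rw [show (u[k]'hku :: ((u.take j).drop (k + 1) ++ u.drop (j + 1))) = (u[k]'hku :: ((u.take j).drop (k + 1) ++ u.drop (j + 1))) from rfl]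
      rw [cmp3_append_left (u.take k)]
      rw [afterB]
      simp only [← hk, if_neg hkm, PySem.List.pyGetD_natCast,
        List.getD_eq_getElem u ' ' hku, List.getD_eq_getElem v ' ' hkv']
      by_cases hlt : u[k]'hku < v[k]'hkv'
      · rw [cmp3, if_pos hlt, if_pos ⟨hku, hlt⟩]
      · have hgt : v[k]'hkv' < u[k]'hku := lt_of_le_of_ne (not_lt.1 hlt) (fun h => hne h.symm)
        rw [cmp3, if_neg hlt, if_pos hgt, if_neg (by tauto)]

theorem cstate_eq (u v : List Char) (i : Nat) (hi : i < u.length) :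
    cstate u v i = cmp3 (u.drop (i + 1)) (v.drop i) := by
  rw [cstate, if_neg (by omega)]

theorem Rfun_lt (u v : List Char) (want : Int) (i : Nat) (hi : i < u.length) :
    Rfun u v want i = (if predB u v want i then 1 else 0) + Rfun u v want (i + 1) := by
  rw [Rfun]
  exact dif_pos hi

theorem stepB_eq (u v : List Char) (want : Int) (i : Nat) (hi : i < u.length) :
    stepB u v want (cstate u v (i + 1), Rfun u v want (i + 1)) (i : Int)
      = (cstate u v i, Rfun u v want i) := by
  have hcast : ((i : Int) + 1) = ((i + 1 : Nat) : Int) := by push_cast; ring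
  have hci : (if ((v.length : Int)) ≤ (i : Int) then (if (i : Int) + 1 = (u.length : Int) then 0 else 1)
      else if (i : Int) + 1 = (u.length : Int) then -1
      else if PySem.List.pyGetD u ((i : Int) + 1) ' ' < PySem.List.pyGetD v (i : Int) ' ' then -1
      else if PySem.List.pyGetD v (i : Int) ' ' < PySem.List.pyGetD u ((i : Int) + 1) ' ' then 1
      else cstate u v (i + 1)) = cmp3 (u.drop (i + 1)) (v.drop i) := by
    by_cases hm : v.length ≤ i
    · have hv : v.drop i = [] := List.drop_of_length_le hm
      rw [if_pos (by exact_mod_cast hm), hv]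
      by_cases hn : i + 1 = u.length
      · have hu : u.drop (i + 1) = [] := List.drop_of_length_le (by omega)
        rw [if_pos (by exact_mod_cast congrArg (Nat.cast : Nat → Int) hn), hu]
        rfl
      · have hn1 : i + 1 < u.length := by omega
        rw [if_neg (fun h => hn (by exact_mod_cast hcast ▸ h)),
          List.drop_eq_getElem_cons hn1]
        rfl
    · have hm' : i < v.length := by omega
      rw [if_neg (fun h => hm (by exact_mod_cast h))]
      by_cases hn : i + 1 = u.length
      · have hu : u.drop (i + 1) = [] := List.drop_of_length_le (by omega)
        rw [if_pos (by exact_mod_cast congrArg (Nat.cast : Nat → Int) hn), hu,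
          List.drop_eq_getElem_cons hm']
        rfl
      · have hn1 : i + 1 < u.length := by omega
        rw [if_neg (fun h => hn (by exact_mod_cast hcast ▸ h))]
        rw [hcast, PySem.List.pyGetD_natCast, PySem.List.pyGetD_natCast,
          List.getD_eq_getElem u ' ' hn1, List.getD_eq_getElem v ' ' hm',
          List.drop_eq_getElem_cons hn1, List.drop_eq_getElem_cons hm',
          cstate_eq u v (i + 1) hn1]
        simp only [cmp3]
  simp only [stepB]
  rw [hci]
  refine Prod.ext ?_ ?_
  · exact (cstate_eq u v i hi).symm
  · simp only [PySem.List.pyGetD_natCast]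
    have hk : ((i : Int) ≤ (lcpLenB u v : Int)) ↔ i ≤ lcpLenB u v := by exact_mod_cast Iff.rfl
    have hcond : (if (i : Int) ≤ (lcpLenB u v : Int) then cmp3 (u.drop (i + 1)) (v.drop i)
        else afterB u v) = verdictB u v i := by
      rw [verdictB]
      by_cases h : i ≤ lcpLenB u v
      · rw [if_pos (hk.2 h), if_pos h]
      · rw [if_neg (fun hh => h (hk.1 hh)), if_neg h]
    rw [hcond, Rfun_lt u v want i hi]
    have hiff : (PySem.Str.isdigit (u.getD i ' ') = true ∧ verdictB u v i = want)
        ↔ predB u v want i = true := by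
      rw [predB, Bool.and_eq_true, decide_eq_true_eq]
    by_cases hp : predB u v want i = true
    · rw [if_pos (hiff.mpr hp), if_pos hp]
      ring
    · rw [if_neg (fun hc => hp (hiff.mp hc)), if_neg hp]
      ring

theorem loopB_spec (u v : List Char) (want : Int) (cnt : Nat) (hcnt : cnt ≤ u.length) :
    ((List.range cnt).map (fun k : Nat => (u.length : Int) - 1 - (k : Int))).foldl (stepB u v want) (0, 0)
      = (cstate u v (u.length - cnt), Rfun u v want (u.length - cnt)) := by
  induction cnt with
  | zero =>
    simp only [List.range_zero, List.map_nil, List.foldl_nil, Nat.sub_zero]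
    rw [cstate, if_pos rfl, Rfun, dif_neg (by omega)]
  | succ cnt ih =>
    have hcnt' : cnt ≤ u.length := by omega
    rw [List.range_succ, List.map_append, List.foldl_append, ih hcnt']
    simp only [List.map_cons, List.map_nil, List.foldl_cons, List.foldl_nil]
    have hi : u.length - (cnt + 1) < u.length := by omega
    have hcasti : ((u.length : Int) - 1 - (cnt : Int)) = ((u.length - (cnt + 1) : Nat) : Int) := by
      omega
    have hone : u.length - (cnt + 1) + 1 = u.length - cnt := by omega
    rw [hcasti, ← hone, stepB_eq u v want (u.length - (cnt + 1)) hi]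

theorem pyRange_down (n : Nat) :
    PySem.List.pyRange ((n : Int) - 1) (-1) (-1)
      = (List.range n).map (fun k : Nat => (n : Int) - 1 - (k : Int)) := by
  rw [PySem.List.pyRange]
  rw [if_neg (show ¬ (-1 : Int) = 0 by decide)]
  rw [if_neg (show ¬ (0 : Int) < -1 by decide)]
  cases n with
  | zero =>
    rw [if_neg (show ¬ (-1 : Int) < ((0 : Nat) : Int) - 1 by simp)]
    simp
  | succ m =>
    rw [if_pos (show (-1 : Int) < ((m + 1 : Nat) : Int) - 1 by push_cast; omega)]
    have h2 : ((((m + 1 : Nat) : Int) - 1 - -1 + - -1 - 1) / - -1).toNat = m + 1 := by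
      norm_num
    rw [h2]
    apply List.map_congr_left
    intro a _
    push_cast
    ring

theorem countB_eq_Rfun (u v : List Char) (want : Int) : countB u v want = Rfun u v want 0 := by
  rw [countB, pyRange_down u.length, loopB_spec u v want u.length le_rfl, Nat.sub_self]

theorem loopA_spec (u v : List Char) (want : Int) (f : Int → Int → Int)
    (hf : ∀ (c : Int) (j : Nat), j < u.length →
      f c (j : Int) = c + (if predB u v want j then 1 else 0)) :
    ∀ (m i : Nat) (c0 : Int), i + m = u.length →
      ((List.range' i m).map (fun j : Nat => (j : Int))).foldl f c0 = c0 + Rfun u v want i := by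
  intro m
  induction m with
  | zero =>
    intro i c0 h
    rw [List.range'_zero, List.map_nil, List.foldl_nil, Rfun, dif_neg (by omega)]
    ring
  | succ m ih =>
    intro i c0 h
    rw [List.range'_succ, List.map_cons, List.foldl_cons, hf c0 i (by omega),
      ih (i + 1) _ (by omega), Rfun_lt u v want i (by omega)]
    ring

theorem dir_eq (u v : List Char) (want : Int) (f : Int → Int → Int)
    (hf : ∀ (c : Int) (j : Nat), j < u.length →
      f c (j : Int) = c + (if predB u v want j then 1 else 0)) (c0 : Int) :
    (PySem.List.pyRange 0 (PySem.List.len u) 1).foldl f c0 = c0 + countB u v want := by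
  rw [PySem.List.len_eq, PySem.List.pyRange_zero_natCast, List.range_eq_range',
    loopA_spec u v want f hf u.length 0 c0 (by omega), countB_eq_Rfun]

theorem hfA1 (u v : List Char) (c : Int) (j : Nat) (hj : j < u.length) :
    (if PySem.Str.isdigit (PySem.List.pyGetD u ((j : Nat) : Int) ' ') then
       (if (PySem.List.slice u (some 0) (some ((j : Nat) : Int)) ++
            PySem.List.slice u (some (((j : Nat) : Int) + 1)) none) < v then c + 1 else c)
     else c) = c + (if predB u v (-1) j then 1 else 0) := by
  have hsl : PySem.List.slice u (some 0) (some ((j : Nat) : Int)) ++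
      PySem.List.slice u (some (((j : Nat) : Int) + 1)) none = delAt u j := by
    rw [PySem.List.slice_zero_start, PySem.List.slice_to_natCast,
      show (((j : Nat) : Int) + 1) = (((j + 1 : Nat)) : Int) by push_cast; ring,
      PySem.List.slice_from_natCast, delAt]
  rw [PySem.List.pyGetD_natCast, hsl]
  have hlt : (delAt u j < v) ↔ verdictB u v j = -1 := by
    rw [← cmp3_neg_one_iff, cmp_delAt u v j hj]
  by_cases h1 : PySem.Str.isdigit (u.getD j ' ') = true
  · rw [if_pos h1]
    by_cases h2 : delAt u j < v
    · have hp : predB u v (-1) j = true := by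
        rw [predB, Bool.and_eq_true, decide_eq_true_eq]
        exact ⟨h1, hlt.mp h2⟩
      rw [if_pos h2, hp, if_pos rfl]
    · have hp : predB u v (-1) j = false := by
        rw [predB, h1, Bool.true_and, decide_eq_false (fun hv => h2 (hlt.mpr hv))]
      rw [if_neg h2, hp, if_neg (by simp)]
      ring
  · rw [if_neg h1]
    have hp : predB u v (-1) j = false := by
      rw [predB, Bool.eq_false_iff]
      intro hc
      exact h1 ((Bool.and_eq_true _ _).mp hc).1
    rw [hp, if_neg (by simp)]
    ring

theorem hfA2 (u v : List Char) (c : Int) (j : Nat) (hj : j < u.length) :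
    (if PySem.Str.isdigit (PySem.List.pyGetD u ((j : Nat) : Int) ' ') then
       (if v < (PySem.List.slice u (some 0) (some ((j : Nat) : Int)) ++
            PySem.List.slice u (some (((j : Nat) : Int) + 1)) none) then c + 1 else c)
     else c) = c + (if predB u v 1 j then 1 else 0) := by
  have hsl : PySem.List.slice u (some 0) (some ((j : Nat) : Int)) ++
      PySem.List.slice u (some (((j : Nat) : Int) + 1)) none = delAt u j := by
    rw [PySem.List.slice_zero_start, PySem.List.slice_to_natCast,
      show (((j : Nat) : Int) + 1) = (((j + 1 : Nat)) : Int) by push_cast; ring,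
      PySem.List.slice_from_natCast, delAt]
  rw [PySem.List.pyGetD_natCast, hsl]
  have hlt : (v < delAt u j) ↔ verdictB u v j = 1 := by
    rw [← cmp3_one_iff, cmp_delAt u v j hj]
  by_cases h1 : PySem.Str.isdigit (u.getD j ' ') = true
  · rw [if_pos h1]
    by_cases h2 : v < delAt u j
    · have hp : predB u v 1 j = true := by
        rw [predB, Bool.and_eq_true, decide_eq_true_eq]
        exact ⟨h1, hlt.mp h2⟩
      rw [if_pos h2, hp, if_pos rfl]
    · have hp : predB u v 1 j = false := by
        rw [predB, h1, Bool.true_and, decide_eq_false (fun hv => h2 (hlt.mpr hv))]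
      rw [if_neg h2, hp, if_neg (by simp)]
      ring
  · rw [if_neg h1]
    have hp : predB u v 1 j = false := by
      rw [predB, Bool.eq_false_iff]
      intro hc
      exact h1 ((Bool.and_eq_true _ _).mp hc).1
    rw [hp, if_neg (by simp)]
    ring

-- ===== VERDICT (by name: the statement is the Claim_ definition above) =====
theorem solution_spec : Claim_equal_solution := by
  intro s t _
  show solution s t = solution_alt s t
  simp only [solution, solution_alt]
  rw [dir_eq s.toList t.toList (-1) _
      (fun c j hj => hfA1 s.toList t.toList c j hj) 0,
    dir_eq t.toList s.toList 1 _
      (fun c j hj => hfA2 t.toList s.toList c j hj) (0 + countB s.toList t.toList (-1))]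
  ring
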